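-- pv_equiv track=rewrite | github.com/YahyaMurad/Leetcode-August | 16-Maximum Distance in Arrays/solution.py | maxDistance
-- ===== SOURCE A (Python) =====
-- def maxDistance(arrays):
--     mn = arrays[0][0]
--     mx = arrays[0][-1]
--     res = 0
--
--     for i in range(1, len(arrays)):
--         arr = arrays[i]
--         res = max(res, abs(arr[-1] - mn), abs(mx - arr[0]))
--         mn = min(mn, arr[0])
--         mx = max(mx, arr[-1])
--
--     return res
-- ===== SOURCE B (Python) =====
-- def _scan(f, xs):
--     # prefix-combine list: out[k] = f(xs[0], ..., xs[k])
--     out = [xs[0]]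
--     for x in xs[1:]:
--         out.append(f(out[-1], x))
--     return out
--
-- def maxDistance(arrays):
--     firsts = [a[0] for a in arrays]
--     lasts = [a[-1] for a in arrays]
--     pmn = _scan(min, firsts)   # prefix minima of first elements
--     pmx = _scan(max, lasts)    # prefix maxima of last elements
--     cands = [abs(l - m) for l, m in zip(lasts[1:], pmn)] \
--           + [abs(M - f) for f, M in zip(firsts[1:], pmx)]
--     return max([0] + cands)
-- ===== Notes on version B (the rewrite author's own statement) =====
-- stated objective: alternative
-- what changed: Replaces A's single loop carrying running (mn, mx, res) state by a precomputation phase (first/last projections, prefix-minima and prefix-maxima lists built by a generic scan helper) followed by zip comprehensions of candidate distances and one final max over the candidate list.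
-- outside the precondition, e.g. on maxDistance([]): A raises IndexError, B raises IndexError; on maxDistance([[1, 2], []]): A raises IndexError, B raises IndexError
import Mathlib
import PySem

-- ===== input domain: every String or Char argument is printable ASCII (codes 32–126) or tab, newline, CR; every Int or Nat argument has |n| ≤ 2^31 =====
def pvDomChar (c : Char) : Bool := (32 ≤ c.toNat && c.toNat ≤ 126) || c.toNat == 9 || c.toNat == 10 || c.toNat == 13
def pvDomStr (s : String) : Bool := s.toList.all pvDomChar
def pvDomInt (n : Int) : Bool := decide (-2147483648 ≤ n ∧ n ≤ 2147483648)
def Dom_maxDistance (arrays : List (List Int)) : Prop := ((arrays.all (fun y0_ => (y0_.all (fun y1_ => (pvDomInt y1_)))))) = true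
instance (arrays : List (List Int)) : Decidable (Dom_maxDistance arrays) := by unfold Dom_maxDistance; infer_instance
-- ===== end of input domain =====

-- B replaces A's single loop over running (mn, mx, res) state by precomputed prefix-min/-max
-- lists combined with zip comprehensions and one final max (objective: alternative decomposition).

-- ===== PORT A =====
-- loop body of A: res/mn/mx update from the current array (fields use the OLD mn, mx)
def stepA (s : Int × Int × Int) (arr : List Int) : Int × Int × Int :=
  (min s.1 (PySem.List.pyGetD arr 0 0),
   max s.2.1 (PySem.List.pyGetD arr (-1) 0),
   max (max s.2.2 |PySem.List.pyGetD arr (-1) 0 - s.1|) |s.2.1 - PySem.List.pyGetD arr 0 0|)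

def maxDistance (arrays : List (List Int)) : Int :=
  -- mn = arrays[0][0]; mx = arrays[0][-1]  (pyGetD defaults are unreachable under Pre_)
  let mn := PySem.List.pyGetD (PySem.List.pyGetD arrays 0 []) 0 0
  let mx := PySem.List.pyGetD (PySem.List.pyGetD arrays 0 []) (-1) 0
  ((PySem.List.pyRange 1 (arrays.length : Int) 1).foldl
      (fun s i => stepA s (PySem.List.pyGetD arrays i [])) (mn, mx, 0)).2.2

-- ===== PORT B =====
-- _scan(f, xs): out = [xs[0]]; for x in xs[1:]: out.append(f(out[-1], x))
def pvScanAux (f : Int → Int → Int) : Int → List Int → List Int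
  | _, [] => []
  | cur, x :: xs => f cur x :: pvScanAux f (f cur x) xs

def pvScan (f : Int → Int → Int) : List Int → List Int
  | [] => []        -- Source B raises here (xs[0]); unreachable under Pre_
  | x :: xs => x :: pvScanAux f x xs

def maxDistance_alt (arrays : List (List Int)) : Int :=
  let firsts := arrays.map (fun a => PySem.List.pyGetD a 0 0)
  let lasts := arrays.map (fun a => PySem.List.pyGetD a (-1) 0)
  let pmn := pvScan min firsts
  let pmx := pvScan max lasts
  let cands := ((lasts.drop 1).zip pmn).map (fun p => |p.1 - p.2|)
            ++ ((firsts.drop 1).zip pmx).map (fun p => |p.2 - p.1|)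
  (PySem.List.max? (0 :: cands) (fun y => y)).getD 0

-- ===== PRECONDITION & SPEC =====
-- Pre_ excludes exactly the inputs where Python A raises an IndexError: an empty outer list
-- (arrays[0]) or an empty inner array (arr[0] / arr[-1]).
def Pre_maxDistance (arrays : List (List Int)) : Prop :=
  arrays ≠ [] ∧ ∀ a ∈ arrays, a ≠ []
instance (arrays : List (List Int)) : Decidable (Pre_maxDistance arrays) := by
  unfold Pre_maxDistance; infer_instance

def pvWitness_maxDistance : List (List Int) := [[1, 4], [0, 5], [2]]

def Spec_maxDistance (arrays : List (List Int)) (out : Int) : Prop := out = maxDistance_alt arrays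
instance (arrays : List (List Int)) (out : Int) : Decidable (Spec_maxDistance arrays out) := by
  unfold Spec_maxDistance; infer_instance

-- ===== CLAIM (what is proved, stated in full; the proofs are below) =====
def Claim_equal_maxDistance : Prop := ∀ (arrays : List (List Int)), Dom_maxDistance arrays → Pre_maxDistance arrays → Spec_maxDistance arrays (maxDistance arrays)

-- ===== LEMMAS AND PROOFS =====

-- first / last element of an array, as both ports read them
def pvF (a : List Int) : Int := PySem.List.pyGetD a 0 0
def pvL (a : List Int) : Int := PySem.List.pyGetD a (-1) 0

-- the |last_j - (prefix min of firsts)| candidates, as a recursion carrying the running min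
def pvCL (mn : Int) : List (List Int) → List Int
  | [] => []
  | a :: t => |pvL a - mn| :: pvCL (min mn (pvF a)) t

-- the |(prefix max of lasts) - first_j| candidates, carrying the running max
def pvFL (mx : Int) : List (List Int) → List Int
  | [] => []
  | a :: t => |mx - pvF a| :: pvFL (max mx (pvL a)) t

theorem pv_foldl_max_mid (xs : List Int) (r a : Int) (ys : List Int) :
    List.foldl max r (xs ++ a :: ys) = List.foldl max (max r a) (xs ++ ys) := by
  induction xs generalizing r with
  | nil => rfl
  | cons x t ih => simp only [List.cons_append, List.foldl_cons, ih, max_right_comm]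

theorem pv_mainA (rest : List (List Int)) : ∀ mn mx res : Int,
    (rest.foldl stepA (mn, mx, res)).2.2
      = List.foldl max res (pvCL mn rest ++ pvFL mx rest) := by
  induction rest with
  | nil => intro mn mx res; rfl
  | cons a t ih =>
    intro mn mx res
    simp only [List.foldl_cons, pvCL, pvFL, stepA, List.cons_append, List.foldl_cons,
      pv_foldl_max_mid, ih, pvF, pvL]

theorem pv_zipCL (rest : List (List Int)) : ∀ mn : Int,
    ((rest.map pvL).zip (mn :: pvScanAux min mn (rest.map pvF))).map (fun p => |p.1 - p.2|)
      = pvCL mn rest := by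
  induction rest with
  | nil => intro mn; rfl
  | cons a t ih =>
    intro mn
    simp only [List.map_cons, pvScanAux, List.zip_cons_cons, List.map_cons, pvCL, ih]

theorem pv_zipFL (rest : List (List Int)) : ∀ mx : Int,
    ((rest.map pvF).zip (mx :: pvScanAux max mx (rest.map pvL))).map (fun p => |p.2 - p.1|)
      = pvFL mx rest := by
  induction rest with
  | nil => intro mx; rfl
  | cons a t ih =>
    intro mx
    simp only [List.map_cons, pvScanAux, List.zip_cons_cons, List.map_cons, pvFL, ih]

theorem pv_alt_cons (a0 : List Int) (rest : List (List Int)) :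
    maxDistance_alt (a0 :: rest)
      = List.foldl max 0 (pvCL (pvF a0) rest ++ pvFL (pvL a0) rest) := by
  simp only [maxDistance_alt, List.map_cons, pvScan, List.drop_succ_cons, List.drop_zero,
    PySem.List.max?_id_cons, Option.getD_some]
  rw [show (fun a => PySem.List.pyGetD a 0 (0 : Int)) = pvF from rfl,
      show (fun a => PySem.List.pyGetD a (-1) (0 : Int)) = pvL from rfl,
      pv_zipCL, pv_zipFL]
  rfl

theorem pv_A_cons (a0 : List Int) (rest : List (List Int)) :
    maxDistance (a0 :: rest)
      = List.foldl max 0 (pvCL (pvF a0) rest ++ pvFL (pvL a0) rest) := by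
  have h := PySem.List.foldl_pyRange_pyGetD' (a0 :: rest) ([] : List Int) stepA
      (pvF a0, pvL a0, (0 : Int)) (a := 1) (by norm_num)
  simp only [maxDistance, PySem.List.pyGetD_zero_cons, pvF, pvL] at h ⊢
  rw [h]
  simp only [Int.toNat_one, List.drop_succ_cons, List.drop_zero]
  exact pv_mainA rest _ _ 0

-- ===== VERDICT (by name: the statement is the Claim_ definition above) =====
theorem maxDistance_spec : Claim_equal_maxDistance := by
  intro arrays _ hpre
  unfold Spec_maxDistance
  match arrays with
  | [] => exact absurd rfl hpre.1
  | a0 :: rest => rw [pv_A_cons, pv_alt_cons]
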